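-- pv_equiv track=rewrite | github.com/x59272796/280201065 | lab8/example5.py | securityLevel
-- ===== SOURCE A (Python) =====
-- def securityLevel(password) :
--   level = 0
--   if len(password) < 8 or " " in password :
--     level = 0
--   else :
--     alpha = False
--     num = False
--     special = False
--     for character in password :
--       if character.isalpha() :
--         alpha = True
--       elif character.isnumeric() :
--         num = True
--       else :
--         special = True
--     if alpha == True :
--       level += 1
--     if num == True :
--       level += 1
--     if special == True :
--       level += 1
--   return "Level " + str(level)
-- ===== SOURCE B (Python) =====
-- def securityLevel(password):
--     if len(password) < 8 or " " in password:
--         return "Level 0"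
--     a = any(c.isalpha() for c in password)
--     n = any(c.isnumeric() for c in password)
--     s = any(not c.isalpha() and not c.isnumeric() for c in password)
--     return "Level " + str(a + n + s)
-- ===== Notes on version B (the rewrite author's own statement) =====
-- stated objective: idiomatic
-- what changed: Replaces the single pass with three mutable flag accumulators (plus a post-hoc level tally) by an early return for Level 0 and three independent any() scans whose boolean sum is the level.
import Mathlib
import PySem

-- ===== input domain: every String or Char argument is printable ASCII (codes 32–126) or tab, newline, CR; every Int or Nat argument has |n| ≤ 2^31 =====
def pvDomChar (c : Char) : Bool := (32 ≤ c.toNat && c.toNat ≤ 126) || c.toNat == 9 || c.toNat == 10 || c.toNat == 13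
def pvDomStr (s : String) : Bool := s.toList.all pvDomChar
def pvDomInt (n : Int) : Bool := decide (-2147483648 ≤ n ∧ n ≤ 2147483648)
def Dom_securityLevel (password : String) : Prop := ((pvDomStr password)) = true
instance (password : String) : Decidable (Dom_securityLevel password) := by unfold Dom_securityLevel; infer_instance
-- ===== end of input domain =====

-- B replaces A's single three-flag accumulator pass by an early return and three independent any-scans; objective: idiomatic.


-- ===== PORT A =====
-- isnumeric is ported as PySem.Chars.isdigit: on the ASCII domain they coincide.
def securityLevel (password : String) : String :=
  let level : Int := 0
  if PySem.Str.len password < 8 ∨ ' ' ∈ password.toList then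
    "Level " ++ PySem.Int.toStr level
  else
    let st := password.toList.foldl
      (fun (st : Bool × Bool × Bool) c =>
        if PySem.Chars.isalpha c then (true, st.2.1, st.2.2)
        else if PySem.Chars.isdigit c then (st.1, true, st.2.2)
        else (st.1, st.2.1, true))
      (false, false, false)
    let level := if st.1 = true then level + 1 else level
    let level := if st.2.1 = true then level + 1 else level
    let level := if st.2.2 = true then level + 1 else level
    "Level " ++ PySem.Int.toStr level

-- ===== PORT B =====
def securityLevel_alt (password : String) : String :=
  if PySem.Str.len password < 8 ∨ ' ' ∈ password.toList then
    "Level 0"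
  else
    let a := password.toList.any (fun c => PySem.Chars.isalpha c)
    let n := password.toList.any (fun c => PySem.Chars.isdigit c)
    let s := password.toList.any (fun c => !PySem.Chars.isalpha c && !PySem.Chars.isdigit c)
    "Level " ++ PySem.Int.toStr ((if a then 1 else 0) + (if n then 1 else 0) + (if s then 1 else 0))

-- ===== PRECONDITION & SPEC =====
def Spec_securityLevel (password : String) (out : String) : Prop := out = securityLevel_alt password
instance (password : String) (out : String) : Decidable (Spec_securityLevel password out) := by unfold Spec_securityLevel; infer_instance

-- ===== CLAIM (what is proved, stated in full; the proofs are below) =====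
def Claim_equal_securityLevel : Prop := ∀ (password : String), Dom_securityLevel password → Spec_securityLevel password (securityLevel password)

-- ===== LEMMAS AND PROOFS =====

-- A's fold sets each flag iff the corresponding character class occurs (num via the elif, i.e. not-alpha ∧ digit).
theorem fold_flags (l : List Char) (st : Bool × Bool × Bool) :
    l.foldl
      (fun (st : Bool × Bool × Bool) c =>
        if PySem.Chars.isalpha c then (true, st.2.1, st.2.2)
        else if PySem.Chars.isdigit c then (st.1, true, st.2.2)
        else (st.1, st.2.1, true))
      st
    = (st.1 || l.any (fun c => PySem.Chars.isalpha c),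
       st.2.1 || l.any (fun c => !PySem.Chars.isalpha c && PySem.Chars.isdigit c),
       st.2.2 || l.any (fun c => !PySem.Chars.isalpha c && !PySem.Chars.isdigit c)) := by
  induction l generalizing st with
  | nil => simp
  | cons c cs ih =>
    simp only [List.foldl_cons, List.any_cons, ih]
    by_cases h1 : PySem.Chars.isalpha c <;> by_cases h2 : PySem.Chars.isdigit c <;>
      simp [h1, h2]

-- no character is both alphabetic (in Python's ASCII-exact sense) and a digit, so A's elif-flag equals B's plain digit scan
theorem alpha_digit_disjoint (c : Char) :
    (!PySem.Chars.isalpha c && PySem.Chars.isdigit c) = PySem.Chars.isdigit c := by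
  cases hd : PySem.Chars.isdigit c
  · simp
  · suffices h : PySem.Chars.isalpha c = false by simp [h]
    simp only [PySem.Chars.isdigit, Bool.and_eq_true, decide_eq_true_eq] at hd
    simp only [PySem.Chars.isalpha, PySem.Chars.isupper, PySem.Chars.islower,
      Bool.or_eq_false_iff, Bool.and_eq_false_iff, decide_eq_false_iff_not]
    exact ⟨Or.inl (fun h => absurd (le_trans h hd.2) (by decide)),
           Or.inl (fun h => absurd (le_trans h hd.2) (by decide))⟩

-- ===== VERDICT (by name: the statement is the Claim_ definition above) =====
theorem securityLevel_spec : Claim_equal_securityLevel := by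
  intro p _
  unfold Spec_securityLevel securityLevel securityLevel_alt
  by_cases hg : PySem.Str.len p < 8 ∨ ' ' ∈ p.toList
  · simp only [if_pos hg]
    rfl
  · simp only [if_neg hg]
    rw [fold_flags]
    simp only [alpha_digit_disjoint, Bool.false_or]
    congr 1
    congr 1
    cases p.toList.any (fun c => PySem.Chars.isalpha c) <;>
      cases p.toList.any (fun c => PySem.Chars.isdigit c) <;>
      cases p.toList.any (fun c => !PySem.Chars.isalpha c && !PySem.Chars.isdigit c) <;>
      rfl
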